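-- pv_equiv track=rewrite | github.com/ushahk/python-facebook | isomorphic.py | ditcs
-- ===== SOURCE A (Python) =====
-- def ditcs(b):
--   db={}
--   for i in b: db[i]=None
--   for i,j in enumerate(b):
--     if db[j] is None:
--       db[j]=str(i)
--     else:
--       db[j]=db[j]+str(i)
--   return db
-- ===== SOURCE B (Python) =====
-- def ditcs(b):
--     db = {}
--     for j in b:
--         if j not in db:
--             s = ''
--             for i, x in enumerate(b):
--                 if x == j:
--                     s += str(i)
--             db[j] = s
--     return db
-- ===== Notes on version B (the rewrite author's own statement) =====
-- stated objective: alternative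
-- what changed: replaces A's single accumulating pass with a None-sentinel dict by a per-distinct-key rescan of b: each key is inserted once in first-appearance order and its value built by a fresh scan collecting that key's indices
import Mathlib
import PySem

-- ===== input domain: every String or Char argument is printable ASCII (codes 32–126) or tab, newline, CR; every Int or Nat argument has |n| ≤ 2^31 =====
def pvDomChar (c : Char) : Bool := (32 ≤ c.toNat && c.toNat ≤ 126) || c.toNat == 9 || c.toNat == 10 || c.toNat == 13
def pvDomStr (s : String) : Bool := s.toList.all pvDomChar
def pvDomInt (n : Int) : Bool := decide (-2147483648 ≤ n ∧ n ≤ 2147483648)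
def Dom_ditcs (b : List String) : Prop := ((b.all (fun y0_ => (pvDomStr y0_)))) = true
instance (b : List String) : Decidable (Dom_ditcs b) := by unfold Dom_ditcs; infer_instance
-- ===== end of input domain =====

-- B replaces A's single accumulating pass (None-sentinel dict) by one per-distinct-key rescan of b
-- collecting that key's indices; same return value, no speed claim (B does more scans).

-- ===== PORT A =====
-- the branch `if db[j] is None: … else: …` of A's second loop
def pvStep (i : Int) (v : Option String) : Option String :=
  match v with
  | none => some (PySem.Int.toStr i)
  | some s => some (s ++ PySem.Int.toStr i)

-- Port of A. `db[j]` always exists when the second loop reads it (the first loop inserted every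
-- element of b), so `modify` with default `none` reads exactly the value Python reads; at return
-- every value is `some` (each key occurs in b), unwrapped with `.getD ""` for the declared type.
def ditcs (b : List String) : List (String × String) :=
  ((PySem.List.enumerate b).foldl (fun d p => d.modify p.2 none (fun v => pvStep p.1 v))
      (b.foldl (fun d i => d.insert i (none : Option String)) PySem.Dict.empty)).items.map
    (fun p => (p.1, p.2.getD ""))

-- ===== PORT B =====
-- `s = ''; for i, x in enumerate(b): if x == j: s += str(i)`
def pvIdxStr (b : List String) (j : String) : String :=
  (PySem.List.enumerate b).foldl (fun s p => if p.2 == j then s ++ PySem.Int.toStr p.1 else s) ""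

def ditcs_alt (b : List String) : List (String × String) :=
  (b.foldl (fun d j => if d.contains j then d else d.insert j (pvIdxStr b j))
    PySem.Dict.empty).items

-- ===== PRECONDITION & SPEC =====
def Spec_ditcs (b : List String) (out : List (String × String)) : Prop := out = ditcs_alt b
instance (b : List String) (out : List (String × String)) : Decidable (Spec_ditcs b out) := by unfold Spec_ditcs; infer_instance

-- ===== CLAIM (what is proved, stated in full; the proofs are below) =====
def Claim_equal_ditcs : Prop := ∀ (b : List String), Dom_ditcs b → Spec_ditcs b (ditcs b)

-- ===== LEMMAS AND PROOFS =====

-- first occurrences of l not already in seen (how both dicts grow their key list)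
def pvNew (seen : List String) : List String → List String
  | [] => []
  | j :: t => if j ∈ seen then pvNew seen t else j :: pvNew (seen ++ [j]) t

lemma pvSet_update_eq (l : List String) : ∀ s : List String,
    PySem.Set.update s l = s ++ pvNew s l := by
  induction l with
  | nil => intro s; simp [PySem.Set.update, pvNew]
  | cons j t ih =>
    intro s
    simp only [PySem.Set.update, List.foldl_cons] at *
    by_cases h : j ∈ s
    · simp [PySem.Set.add, h, pvNew, ih]
    · simp [PySem.Set.add, h, pvNew, ih]

lemma pvNew_mem : ∀ (l seen : List String) (x : String),
    x ∈ pvNew seen l ↔ x ∈ l ∧ x ∉ seen := by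
  intro l
  induction l with
  | nil => intro seen x; simp [pvNew]
  | cons j t ih =>
    intro seen x
    by_cases h : j ∈ seen
    · simp only [pvNew, if_pos h, ih, List.mem_cons]
      constructor
      · rintro ⟨hx, hs⟩; exact ⟨Or.inr hx, hs⟩
      · rintro ⟨hx | hx, hs⟩
        · exact absurd (hx ▸ h) hs
        · exact ⟨hx, hs⟩
    · simp only [pvNew, if_neg h, List.mem_cons, ih, List.mem_append]
      constructor
      · rintro (rfl | ⟨hx, hs⟩)
        · exact ⟨Or.inl rfl, h⟩
        · exact ⟨Or.inr hx, fun hc => hs (Or.inl hc)⟩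
      · rintro ⟨hx | hx, hs⟩
        · exact Or.inl hx
        · by_cases hxj : x = j
          · exact Or.inl hxj
          · exact Or.inr ⟨hx, by simp [hs, hxj]⟩

lemma pvNew_nil_of_subset : ∀ (l seen : List String),
    (∀ x ∈ l, x ∈ seen) → pvNew seen l = [] := by
  intro l
  induction l with
  | nil => intro seen _; rfl
  | cons j t ih =>
    intro seen h
    have hj : j ∈ seen := h j (by simp)
    simp [pvNew, hj, ih seen (fun x hx => h x (by simp [hx]))]

lemma pvEnum_snd : ∀ (b : List String) (s : Int),
    (PySem.List.enumerate b s).map (fun p => p.2) = b := by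
  intro b
  induction b with
  | nil => intro s; simp [PySem.List.enumerate]
  | cons x t ih => intro s; simp [PySem.List.enumerate, ih]

lemma pvPhase2_getD : ∀ (l : List (Int × String)) (d : PySem.Dict String (Option String)) (k : String),
    (l.foldl (fun d p => d.modify p.2 none (fun v => pvStep p.1 v)) d).getD k none
      = (l.filter (fun p => p.2 == k)).foldl (fun v p => pvStep p.1 v) (d.getD k none) := by
  intro l
  induction l with
  | nil => intro d k; simp
  | cons p t ih =>
    intro d k
    simp only [List.foldl_cons, List.filter_cons]
    by_cases h : p.2 = k
    · subst h
      rw [if_pos (show (p.2 == p.2) = true by simp), List.foldl_cons, ih,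
        PySem.Dict.getD_modify, if_pos rfl]
    · have hb : (p.2 == k) = false := by simp [h]
      rw [hb]
      simp only [Bool.false_eq_true, if_false, ih]
      rw [PySem.Dict.getD_modify, if_neg (fun hc => h hc.symm)]

lemma pvInsertNone_getD : ∀ (l : List String) (d : PySem.Dict String (Option String)) (k : String),
    d.getD k none = none →
    (l.foldl (fun d i => d.insert i (none : Option String)) d).getD k none = none := by
  intro l
  induction l with
  | nil => intro d k h; simpa using h
  | cons i t ih =>
    intro d k h
    simp only [List.foldl_cons]
    exact ih _ _ (by rw [PySem.Dict.getD_insert]; split <;> simp [h])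

lemma pvFoldl_pvStep_some : ∀ (fl : List (Int × String)) (s : String),
    fl.foldl (fun v p => pvStep p.1 v) (some s)
      = some (fl.foldl (fun s p => s ++ PySem.Int.toStr p.1) s) := by
  intro fl
  induction fl with
  | nil => intro s; rfl
  | cons p t ih =>
    intro s
    simp only [List.foldl_cons]
    exact ih (s ++ PySem.Int.toStr p.1)

lemma pvFoldl_pvStep_none (fl : List (Int × String)) :
    (fl.foldl (fun v p => pvStep p.1 v) none).getD ""
      = fl.foldl (fun s p => s ++ PySem.Int.toStr p.1) "" := by
  cases fl with
  | nil => rfl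
  | cons p t =>
    simp only [List.foldl_cons]
    show (List.foldl (fun v p => pvStep p.1 v) (some (PySem.Int.toStr p.1)) t).getD "" = _
    rw [pvFoldl_pvStep_some]
    simp

lemma pvB_items (b : List String) : ∀ (l : List String) (d : PySem.Dict String String),
    (l.foldl (fun d j => if d.contains j then d else d.insert j (pvIdxStr b j)) d).items
      = d.items ++ (pvNew d.keys l).map (fun k => (k, pvIdxStr b k)) := by
  intro l
  induction l with
  | nil => intro d; simp [pvNew]
  | cons j t ih =>
    intro d
    simp only [List.foldl_cons]
    by_cases hm : j ∈ d.keys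
    · have hc : d.contains j = true := by
        rw [PySem.Dict.contains_eq_decide_mem_keys]; simpa using hm
      have hk : d.keys.contains j = true := by simpa using hm
      rw [hc, if_pos rfl, ih]
      simp [pvNew, hm]
    · have hc : d.contains j = false := by
        rw [PySem.Dict.contains_eq_decide_mem_keys]; simpa using hm
      have hk : d.keys.contains j = false := by simpa using hm
      rw [hc]
      simp only [Bool.false_eq_true, if_false, ih,
        PySem.Dict.items_insert_of_not_contains d _ hc,
        PySem.Dict.keys_insert_of_not_contains d _ hc]
      simp [pvNew, hm]

-- ===== VERDICT (by name: the statement is the Claim_ definition above) =====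
theorem ditcs_spec : Claim_equal_ditcs := by
  intro b _
  unfold Spec_ditcs ditcs ditcs_alt
  -- names for A's two dicts
  set db1 := b.foldl (fun d i => d.insert i (none : Option String)) PySem.Dict.empty with hdb1
  set db2 := (PySem.List.enumerate b).foldl
      (fun d p => d.modify p.2 none (fun v => pvStep p.1 v)) db1 with hdb2
  have hk1 : db1.keys = pvNew [] b := by
    rw [hdb1, PySem.Dict.keys_foldl_insert, PySem.Dict.keys_empty, pvSet_update_eq]
    simp
  have hnd1 : db1.keys.Nodup := by
    rw [hdb1]
    exact PySem.Dict.nodup_keys_foldl_insert b _ _ (by simp [PySem.Dict.keys_empty])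
  have hk2 : db2.keys = pvNew [] b := by
    rw [hdb2, PySem.Dict.keys_foldl_modify_key, pvEnum_snd, hk1, pvSet_update_eq,
      pvNew_nil_of_subset b (pvNew [] b)
        (fun x hx => (pvNew_mem b [] x).2 ⟨hx, by simp⟩)]
    simp
  have hnd2 : db2.keys.Nodup := by
    rw [hdb2]
    exact PySem.Dict.nodup_keys_foldl_modify_key _ _ _ _ _ hnd1
  have hval : ∀ k : String, (db2.getD k none).getD "" = pvIdxStr b k := by
    intro k
    rw [hdb2, pvPhase2_getD, hdb1,
      pvInsertNone_getD b PySem.Dict.empty k (by simp [PySem.Dict.getD_empty]),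
      pvFoldl_pvStep_none, pvIdxStr, List.foldl_filter]
  have hempty : (PySem.Dict.empty : PySem.Dict String String).items = [] := rfl
  rw [PySem.Dict.items_eq_map_keys db2 hnd2 none, hk2, List.map_map,
    pvB_items b b PySem.Dict.empty, PySem.Dict.keys_empty, hempty, List.nil_append]
  exact List.map_congr_left fun k _ => by
    simp only [Function.comp_apply]
    rw [hval k]
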